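-- pv_equiv track=rewrite | github.com/HaCaTeam/desafio1 | conteudos_rapidos/stories.py | clip_transcript
-- ===== SOURCE A (Python) =====
-- def clip_transcript(transcripts, clip):
--     start_period = clip['start_period'].replace("T", " ").replace("Z", "")
--     end_period = clip['end_period'].replace("T", " ").replace("Z", "")
--
--     clip_transcripts = []
--     start = False
--     for row in transcripts:
--         if not start and row[0].split(".")[0] == start_period:
--             start = True
--             clip_transcripts.append(row[2])
--         elif start and row[1].split(".")[0] == end_period:
--             clip_transcripts.append(row[2])
--             break
--         elif start:
--             clip_transcripts.append(row[2])
--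
--     return clip_transcripts
-- ===== SOURCE B (Python) =====
-- def clip_transcript(transcripts, clip):
--     sp = clip['start_period'].replace("T", " ").replace("Z", "")
--     ep = clip['end_period'].replace("T", " ").replace("Z", "")
--
--     rows = list(transcripts)
--     i = next((k for k, r in enumerate(rows) if r[0].split(".")[0] == sp), None)
--     if i is None:
--         return []
--     j = next((k for k, r in enumerate(rows[i + 1:], i + 1)
--               if r[1].split(".")[0] == ep), None)
--     stop = len(rows) if j is None else j + 1
--     return [r[2] for r in rows[i:stop]]
-- ===== Notes on version B (the rewrite author's own statement) =====
-- stated objective: alternative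
-- what changed: Instead of one copying pass with a boolean flag, B first locates the start index and the end index (the first end-match strictly after the start) as two searches, then produces the answer by slicing that index range and projecting column 2.
import Mathlib
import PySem

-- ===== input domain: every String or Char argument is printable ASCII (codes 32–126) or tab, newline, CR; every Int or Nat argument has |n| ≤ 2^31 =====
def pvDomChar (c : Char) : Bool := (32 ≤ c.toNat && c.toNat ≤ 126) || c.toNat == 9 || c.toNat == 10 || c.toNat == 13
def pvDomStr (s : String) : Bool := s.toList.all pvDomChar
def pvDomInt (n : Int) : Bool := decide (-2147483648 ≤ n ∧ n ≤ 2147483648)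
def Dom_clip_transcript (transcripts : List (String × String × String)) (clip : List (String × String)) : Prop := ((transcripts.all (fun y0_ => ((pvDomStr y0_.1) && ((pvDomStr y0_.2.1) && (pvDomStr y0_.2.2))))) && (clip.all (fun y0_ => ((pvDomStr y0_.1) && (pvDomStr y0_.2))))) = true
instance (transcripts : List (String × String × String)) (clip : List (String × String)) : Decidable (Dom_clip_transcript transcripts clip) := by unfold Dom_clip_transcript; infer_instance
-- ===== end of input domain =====

-- B replaces A's copying pass with a boolean flag by two index searches (start index, then first
-- end-match after it) followed by a slice of that range projected to column 2; same cost.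

-- dict lookup: first match in the association list (none = KeyError, excluded by Pre_)
def pvLookup (clip : List (String × String)) (k : String) : Option String :=
  (clip.find? (fun p => p.1 == k)).map (·.2)

-- clip['...'].replace("T", " ").replace("Z", "")
def pvPeriod (clip : List (String × String)) (k : String) : String :=
  PySem.Str.replace (PySem.Str.replace ((pvLookup clip k).getD "") "T" " ") "Z" ""

-- row[i].split(".")[0]  (split with a non-empty separator is never empty, so index 0 is total)
def pvHead (s : String) : String := ((PySem.Str.split? s ".").getD []).headD ""

-- ===== PORT A =====
-- the for-loop with the `start` flag, transcribed branch for branch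
def clipA_loop (sp ep : String) (start : Bool) : List (String × String × String) → List String
  | [] => []
  | (a, b, c) :: rest =>
    if !start && (pvHead a == sp) then c :: clipA_loop sp ep true rest
    else if start && (pvHead b == ep) then [c]
    else if start then c :: clipA_loop sp ep start rest
    else clipA_loop sp ep start rest

def clip_transcript (transcripts : List (String × String × String)) (clip : List (String × String)) : List String :=
  clipA_loop (pvPeriod clip "start_period") (pvPeriod clip "end_period") false transcripts

-- ===== PORT B =====
-- find start index; find first end-match strictly after it; slice [i:stop] and project column 2
-- (the Python slice has 0 ≤ i ≤ stop ≤ len, so drop/take is exact here)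
def clip_transcript_alt (transcripts : List (String × String × String)) (clip : List (String × String)) : List String :=
  let sp := pvPeriod clip "start_period"
  let ep := pvPeriod clip "end_period"
  match transcripts.findIdx? (fun r => pvHead r.1 == sp) with
  | none => []
  | some i =>
    let stop :=
      match (transcripts.drop (i + 1)).findIdx? (fun r => pvHead r.2.1 == ep) with
      | none => transcripts.length
      | some k => (i + 1 + k) + 1
    (((transcripts.drop i).take (stop - i)).map (·.2.2))

-- ===== PRECONDITION & SPEC =====
-- Pre_ excludes exactly the inputs where A raises KeyError: clip missing one of the two keys.
def Pre_clip_transcript (transcripts : List (String × String × String)) (clip : List (String × String)) : Prop :=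
  (pvLookup clip "start_period").isSome ∧ (pvLookup clip "end_period").isSome
instance (transcripts : List (String × String × String)) (clip : List (String × String)) : Decidable (Pre_clip_transcript transcripts clip) := by unfold Pre_clip_transcript; infer_instance

def pvWitness_clip_transcript : (List (String × String × String)) × (List (String × String)) :=
  ([("2020-01-01 00:00:01.5", "2020-01-01 00:00:02.5", "hi")],
   [("start_period", "2020-01-01T00:00:01Z"), ("end_period", "2020-01-01T00:00:02Z")])

def Spec_clip_transcript (transcripts : List (String × String × String)) (clip : List (String × String)) (out : List String) : Prop := out = clip_transcript_alt transcripts clip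
instance (transcripts : List (String × String × String)) (clip : List (String × String)) (out : List String) : Decidable (Spec_clip_transcript transcripts clip out) := by unfold Spec_clip_transcript; infer_instance

-- ===== CLAIM =====
def Claim_equal_clip_transcript : Prop := ∀ (transcripts : List (String × String × String)) (clip : List (String × String)), Dom_clip_transcript transcripts clip → Pre_clip_transcript transcripts clip → Spec_clip_transcript transcripts clip (clip_transcript transcripts clip)

-- ===== LEMMAS AND PROOFS =====
-- A's loop in state start=true copies up to and including the first end-match (all rows if none)
theorem clipA_loop_true (sp ep : String) (rows : List (String × String × String)) :
    clipA_loop sp ep true rows =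
      match rows.findIdx? (fun r => pvHead r.2.1 == ep) with
      | none => rows.map (·.2.2)
      | some k => (rows.take (k + 1)).map (·.2.2) := by
  induction rows with
  | nil => rfl
  | cons r rest ih =>
    obtain ⟨a, b, c⟩ := r
    by_cases h : pvHead b == ep <;>
      simp [clipA_loop, List.findIdx?_cons, h, ih] <;>
      cases rest.findIdx? (fun r => pvHead r.2.1 == ep) <;> simp

-- A's loop from start=false equals B's search-then-slice expression
theorem clipA_loop_false (sp ep : String) (rows : List (String × String × String)) :
    clipA_loop sp ep false rows =
      match rows.findIdx? (fun r => pvHead r.1 == sp) with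
      | none => []
      | some i =>
        let stop :=
          match (rows.drop (i + 1)).findIdx? (fun r => pvHead r.2.1 == ep) with
          | none => rows.length
          | some k => (i + 1 + k) + 1
        (((rows.drop i).take (stop - i)).map (·.2.2)) := by
  induction rows with
  | nil => rfl
  | cons r rest ih =>
    obtain ⟨a, b, c⟩ := r
    by_cases h : pvHead a == sp
    · have h1 : clipA_loop sp ep false ((a, b, c) :: rest) = c :: clipA_loop sp ep true rest := by
        simp [clipA_loop, h]
      have hidx : List.findIdx? (fun r => pvHead r.1 == sp) ((a, b, c) :: rest) = some 0 := by
        simp [List.findIdx?_cons, h]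
      rw [h1, clipA_loop_true, hidx]
      simp only [List.drop_succ_cons, List.drop_zero, List.drop_nil]
      cases hk : rest.findIdx? (fun r => pvHead r.2.1 == ep) with
      | none =>
        simp only [hk, List.length_cons, Nat.sub_zero]
        rw [List.take_of_length_le (by simp)]
        simp
      | some k =>
        simp only [hk]
        have h2 : 0 + 1 + k + 1 - 0 = (k + 1) + 1 := by omega
        rw [h2, List.take_succ_cons]
        simp [List.map_take]
    · have h1 : clipA_loop sp ep false ((a, b, c) :: rest) = clipA_loop sp ep false rest := by
        simp [clipA_loop, h]
      have hidx : List.findIdx? (fun r => pvHead r.1 == sp) ((a, b, c) :: rest)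
          = (rest.findIdx? (fun r => pvHead r.1 == sp)).map (· + 1) := by
        simp [List.findIdx?_cons, h]
      rw [h1, ih, hidx]
      cases hi : rest.findIdx? (fun r => pvHead r.1 == sp) with
      | none => simp
      | some i =>
        simp only [Option.map_some, List.drop_succ_cons]
        cases hk : (rest.drop (i + 1)).findIdx? (fun r => pvHead r.2.1 == ep) with
        | none =>
          simp only [hk, List.length_cons]
          have h2 : rest.length + 1 - (i + 1) = rest.length - i := by omega
          rw [h2]
        | some k =>
          have h2 : i + 1 + k + 1 - i = i + 1 + 1 + k + 1 - (i + 1) := by omega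
          rw [h2]

-- ===== VERDICT =====
theorem clip_transcript_spec : Claim_equal_clip_transcript := by
  intro transcripts clip _ _
  unfold Spec_clip_transcript clip_transcript clip_transcript_alt
  exact clipA_loop_false _ _ _
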